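-- pv_equiv track=rewrite | github.com/afontana1/Data-Engineering | Algorithms & Data Structures/code_samples/increasing_subarrays.py | find_monotonically_increasing_subsequences
-- ===== SOURCE A (Python) =====
-- def find_monotonically_increasing_subsequences(lst):
--     subsequences = []
--     current_subsequence = [0]  # Start index
--
--     for i in range(1, len(lst)):
--         if lst[i] > lst[current_subsequence[-1]]:
--             current_subsequence.append(i)
--         else:
--             if len(current_subsequence) > 1:
--                 subsequences.append(current_subsequence)
--             current_subsequence = [i]
--
--     if len(current_subsequence) > 1:
--         subsequences.append(current_subsequence)
--
--     return subsequences
-- ===== SOURCE B (Python) =====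
-- def find_monotonically_increasing_subsequences(lst):
--     n = len(lst)
--     breaks = [i for i in range(1, n) if not lst[i] > lst[i - 1]]
--     bounds = [0] + breaks + [n]
--     return [list(range(a, b)) for a, b in zip(bounds, bounds[1:]) if b - a > 1]
-- ===== Notes on version B (the rewrite author's own statement) =====
-- stated objective: alternative
-- what changed: Replaces the incremental accumulator loop (growing the current run and flushing it on each break) by a breakpoint table: collect all break indices, form segment bounds, and emit each long segment as a range in one segmentation pass.
import Mathlib
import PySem

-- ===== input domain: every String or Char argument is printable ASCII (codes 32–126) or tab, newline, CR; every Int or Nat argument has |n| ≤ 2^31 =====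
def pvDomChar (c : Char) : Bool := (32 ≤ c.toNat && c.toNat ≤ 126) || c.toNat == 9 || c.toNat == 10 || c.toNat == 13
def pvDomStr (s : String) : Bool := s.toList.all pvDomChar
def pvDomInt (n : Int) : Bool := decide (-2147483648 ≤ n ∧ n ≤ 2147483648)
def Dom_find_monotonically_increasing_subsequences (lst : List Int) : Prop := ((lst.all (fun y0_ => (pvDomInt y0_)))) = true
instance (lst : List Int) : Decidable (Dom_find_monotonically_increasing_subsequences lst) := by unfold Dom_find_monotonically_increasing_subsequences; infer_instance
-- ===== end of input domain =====

-- B replaces A's incremental accumulator loop (grow the current run, flush on break) by a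
-- breakpoint table plus one segmentation pass over the bounds (alternative decomposition, same cost).

-- ===== PORT A =====
-- loop body of A's for-loop; state = (subsequences, current_subsequence)
def pvStepA (lst : List Int) (st : List (List Int) × List Int) (i : Int) : List (List Int) × List Int :=
  if PySem.List.pyGetD lst i 0 > PySem.List.pyGetD lst (PySem.List.pyGetD st.2 (-1) 0) 0 then
    (st.1, st.2 ++ [i])
  else if st.2.length > 1 then (st.1 ++ [st.2], [i]) else (st.1, [i])

def find_monotonically_increasing_subsequences (lst : List Int) : List (List Int) :=
  let st := (PySem.List.pyRange 1 (lst.length : Int) 1).foldl (pvStepA lst) ([], [0])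
  if st.2.length > 1 then st.1 ++ [st.2] else st.1

-- ===== PORT B =====
-- breaks = [i for i in range(1, n) if not lst[i] > lst[i - 1]]
def pvBreaks (lst : List Int) (n : Int) : List Int :=
  (PySem.List.pyRange 1 n 1).filter
    (fun i => !(decide (PySem.List.pyGetD lst i 0 > PySem.List.pyGetD lst (i - 1) 0)))

-- [list(range(a, b)) for a, b in zip(bounds, bounds[1:]) if b - a > 1]
-- (zip(bounds, bounds[1:]) is ported exactly as List.zip bounds (bounds.drop 1))
def pvSegs (bounds : List Int) : List (List Int) :=
  ((bounds.zip (bounds.drop 1)).filter (fun p => decide (p.2 - p.1 > 1))).map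
    (fun p => PySem.List.pyRange p.1 p.2 1)

def find_monotonically_increasing_subsequences_alt (lst : List Int) : List (List Int) :=
  let n : Int := lst.length
  pvSegs ([0] ++ pvBreaks lst n ++ [n])

-- ===== PRECONDITION & SPEC =====
def Spec_find_monotonically_increasing_subsequences (lst : List Int) (out : List (List Int)) : Prop := out = find_monotonically_increasing_subsequences_alt lst
instance (lst : List Int) (out : List (List Int)) : Decidable (Spec_find_monotonically_increasing_subsequences lst out) := by unfold Spec_find_monotonically_increasing_subsequences; infer_instance

-- ===== CLAIM (what is proved, stated in full; the proofs are below) =====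
def Claim_equal_find_monotonically_increasing_subsequences : Prop := ∀ (lst : List Int), Dom_find_monotonically_increasing_subsequences lst → Spec_find_monotonically_increasing_subsequences lst (find_monotonically_increasing_subsequences lst)

-- ===== LEMMAS AND PROOFS =====

-- pvSegs consumes one bound at a time
theorem pvSegs_cons_cons (x y : Int) (t : List Int) :
    pvSegs (x :: y :: t) =
      (if y - x > 1 then [PySem.List.pyRange x y 1] else []) ++ pvSegs (y :: t) := by
  simp only [pvSegs, List.drop_succ_cons, List.drop_zero, List.zip_cons_cons, List.filter_cons]
  split <;> simp_all

-- appending a final bound n emits one more (possibly filtered-out) segment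
theorem pvSegs_snoc (L : List Int) (hL : L ≠ []) (n : Int) :
    pvSegs (L ++ [n]) =
      pvSegs L ++ (if n - L.getLast hL > 1 then [PySem.List.pyRange (L.getLast hL) n 1] else []) := by
  induction L with
  | nil => exact absurd rfl hL
  | cons c t IH =>
    cases t with
    | nil =>
      simp only [pvSegs, List.cons_append, List.nil_append, List.drop_succ_cons,
        List.drop_zero, List.zip_cons_cons, List.zip_nil_right, List.filter_cons,
        List.filter_nil, List.getLast_singleton]
      split <;> simp_all
    | cons d t' =>
      have h2 : (c :: d :: t') ++ [n] = c :: d :: (t' ++ [n]) := by simp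
      rw [h2, pvSegs_cons_cons, pvSegs_cons_cons]
      have hIH := IH (by simp)
      simp only [List.cons_append] at hIH
      rw [hIH, List.append_assoc]
      have hg : (c :: d :: t').getLast hL = (d :: t').getLast (by simp) :=
        List.getLast_cons _
      rw [hg]

theorem pvGetLast_zero_cons (xs : List Int) :
    (0 :: xs).getLast (by simp) = xs.getLastD 0 := by
  cases xs with
  | nil => rfl
  | cons a t => rw [List.getLast_cons (by simp), List.getLastD_cons, List.getLast_eq_getLastD]

-- the start of the run A is currently extending = the last break so far (or 0)
def pvLastB (lst : List Int) (n : Int) : Int := (pvBreaks lst n).getLastD 0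

theorem pvLastB_lt (lst : List Int) (n : Int) (h1 : 1 ≤ n) :
    0 ≤ pvLastB lst n ∧ pvLastB lst n < n := by
  have hmem : pvLastB lst n = 0 ∨ pvLastB lst n ∈ pvBreaks lst n := by
    unfold pvLastB
    cases h : pvBreaks lst n with
    | nil => left; rfl
    | cons a t =>
      right
      rw [List.getLastD_cons, ← List.getLast_eq_getLastD (h := by simp)]
      exact List.getLast_mem _
  rcases hmem with h | h
  · omega
  · have := List.mem_filter.mp h |>.1
    have := (PySem.List.mem_pyRange_one).mp this
    omega

theorem pvBreaks_succ (lst : List Int) (m : Int) (hm : 1 ≤ m) :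
    pvBreaks lst (m + 1) =
      pvBreaks lst m ++
        (if PySem.List.pyGetD lst m 0 > PySem.List.pyGetD lst (m - 1) 0 then [] else [m]) := by
  unfold pvBreaks
  rw [PySem.List.pyRange_one_succ_right hm, List.filter_append]
  congr 1
  split <;> simp_all

-- loop invariant of A's fold, phrased against B's break table: after processing range(1, n)
-- the finished subsequences are B's segments of the bounds so far, and the current
-- subsequence is exactly the indices from the last break to n-1
theorem pvFoldA_inv (lst : List Int) (n : Nat) (h1 : 1 ≤ n) :
    (PySem.List.pyRange 1 (n : Int) 1).foldl (pvStepA lst) ([], [0]) =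
      (pvSegs (0 :: pvBreaks lst (n : Int)),
       PySem.List.pyRange (pvLastB lst (n : Int)) (n : Int) 1) := by
  induction n with
  | zero => omega
  | succ m IH =>
    rcases Nat.lt_or_ge m 1 with hm | hm
    · have hm0 : m = 0 := by omega
      subst hm0
      have h1' : ((0 + 1 : Nat) : Int) = 1 := by norm_num
      rw [h1', PySem.List.pyRange_one_eq_nil le_rfl]
      have hb : pvBreaks lst 1 = [] := by
        unfold pvBreaks; rw [PySem.List.pyRange_one_eq_nil le_rfl]; rfl
      have hlb : pvLastB lst 1 = 0 := by unfold pvLastB; rw [hb]; rfl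
      have h01 : PySem.List.pyRange (0 : Int) 1 1 = [0] := by
        have h := PySem.List.pyRange_one_singleton (0 : Int); norm_num at h; exact h
      rw [hb, hlb, h01]
      simp [pvSegs]
    · have hm1 : (1:Int) ≤ (m:Int) := by exact_mod_cast hm
      have hcast : ((m + 1 : Nat) : Int) = (m : Int) + 1 := by push_cast; ring
      rw [hcast, PySem.List.pyRange_one_succ_right hm1, List.foldl_append, IH hm]
      obtain ⟨hb0, hbm⟩ := pvLastB_lt lst (m : Int) hm1
      set b := pvLastB lst (m : Int) with hbdef
      have hcur : PySem.List.pyRange b (m : Int) 1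
          = PySem.List.pyRange b ((m : Int) - 1) 1 ++ [(m : Int) - 1] := by
        have h := PySem.List.pyRange_one_succ_right (a := b) (b := (m : Int) - 1) (by omega)
        have : ((m : Int) - 1) + 1 = (m : Int) := by ring
        rw [this] at h
        exact h
      have hlast : PySem.List.pyGetD (PySem.List.pyRange b (m : Int) 1) (-1) 0 = (m : Int) - 1 := by
        rw [hcur, PySem.List.pyGetD_neg_one_append_singleton]
      rw [pvBreaks_succ lst (m : Int) hm1]
      simp only [List.foldl_cons, List.foldl_nil, pvStepA, hlast]
      by_cases hc : PySem.List.pyGetD lst (m : Int) 0 > PySem.List.pyGetD lst ((m : Int) - 1) 0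
      · rw [if_pos hc, if_pos hc]
        simp only [List.append_nil]
        have : PySem.List.pyRange b (m : Int) 1 ++ [(m : Int)]
            = PySem.List.pyRange b ((m : Int) + 1) 1 :=
          (PySem.List.pyRange_one_succ_right (by omega)).symm
        rw [this]
        have hlB : pvLastB lst ((m : Int) + 1) = b := by
          unfold pvLastB
          rw [pvBreaks_succ lst (m : Int) hm1, if_pos hc, List.append_nil]
          rfl
        rw [hlB]
      · rw [if_neg hc, if_neg hc]
        have hlen : (PySem.List.pyRange b (m : Int) 1).length = ((m : Int) - b).toNat :=
          PySem.List.length_pyRange_one ..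
        have hlastB' : pvLastB lst ((m : Int) + 1) = (m : Int) := by
          unfold pvLastB
          rw [pvBreaks_succ lst (m : Int) hm1, if_neg hc]
          simp
        have hsnoc : pvSegs ((0 :: pvBreaks lst (m : Int)) ++ [(m : Int)])
            = pvSegs (0 :: pvBreaks lst (m : Int)) ++
              (if (m : Int) - b > 1 then [PySem.List.pyRange b (m : Int) 1] else []) := by
          rw [pvSegs_snoc (0 :: pvBreaks lst (m : Int)) (by simp) (m : Int),
            pvGetLast_zero_cons]
          rfl
        rw [hlastB']
        by_cases hl : (m : Int) - b > 1
        · rw [if_pos (by omega : (PySem.List.pyRange b (m : Int) 1).length > 1)]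
          simp only [List.cons_append] at hsnoc
          rw [hsnoc, if_pos hl, PySem.List.pyRange_one_singleton]
        · rw [if_neg (by omega : ¬ (PySem.List.pyRange b (m : Int) 1).length > 1)]
          simp only [List.cons_append] at hsnoc
          rw [hsnoc, if_neg hl, List.append_nil, PySem.List.pyRange_one_singleton]

theorem pv_final (lst : List Int) :
    find_monotonically_increasing_subsequences lst
      = find_monotonically_increasing_subsequences_alt lst := by
  unfold find_monotonically_increasing_subsequences find_monotonically_increasing_subsequences_alt
  cases hn : lst.length with
  | zero =>
    have hb : pvBreaks lst (0 : Int) = [] := by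
      unfold pvBreaks; rw [PySem.List.pyRange_one_eq_nil (by norm_num)]; rfl
    norm_num [hb, pvSegs, PySem.List.pyRange_one_eq_nil]
  | succ m =>
    rw [pvFoldA_inv lst (m + 1) (by omega)]
    set n : Int := ((m + 1 : Nat) : Int) with hndef
    have hn1 : (1 : Int) ≤ n := by simp [hndef]
    obtain ⟨hb0, hbm⟩ := pvLastB_lt lst n hn1
    set b := pvLastB lst n with hbdef
    have hlen : (PySem.List.pyRange b n 1).length = (n - b).toNat :=
      PySem.List.length_pyRange_one ..
    have hsnoc : pvSegs ((0 :: pvBreaks lst n) ++ [n])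
        = pvSegs (0 :: pvBreaks lst n) ++
          (if n - b > 1 then [PySem.List.pyRange b n 1] else []) := by
      rw [pvSegs_snoc (0 :: pvBreaks lst n) (by simp) n, pvGetLast_zero_cons]
      rfl
    simp only [List.cons_append, List.nil_append] at hsnoc ⊢
    rw [hsnoc]
    by_cases hl : n - b > 1
    · rw [if_pos (by omega : (PySem.List.pyRange b n 1).length > 1), if_pos hl]
    · rw [if_neg (by omega : ¬ (PySem.List.pyRange b n 1).length > 1), if_neg hl,
        List.append_nil]

-- ===== VERDICT (by name: the statement is the Claim_ definition above) =====
theorem find_monotonically_increasing_subsequences_spec : Claim_equal_find_monotonically_increasing_subsequences := by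
  intro lst _
  exact pv_final lst
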